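-- pv_equiv track=rewrite | github.com/omegaestable/magma-ai | verify_d3_test.py | d3_side
-- ===== SOURCE A (Python) =====
-- def d3_side(side: str) -> tuple[str, int]:
--     """Compute last letter and depth for one side of an equation."""
--     side = side.strip()
--     has_star = '*' in side
--
--     # Find last letter
--     last_letter = None
--     last_idx = -1
--     for i, c in enumerate(side):
--         if c.isalpha():
--             last_letter = c
--             last_idx = i
--
--     if not has_star:
--         return (last_letter, 0)
--
--     # Count closing parens after last letter
--     c_count = 0
--     for i in range(last_idx + 1, len(side)):
--         if side[i] == ')':
--             c_count += 1
--
--     return (last_letter, c_count + 1)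
-- ===== SOURCE B (Python) =====
-- def d3_side(side: str) -> tuple[str, int]:
--     """Compute last letter and depth for one side of an equation."""
--     side = side.strip()
--     has_star = '*' in side
--     last_letter = None
--     close = 0
--     for c in reversed(side):
--         if c.isalpha():
--             last_letter = c
--             break
--         if c == ')':
--             close += 1
--     return (last_letter, close + 1) if has_star else (last_letter, 0)
-- ===== Notes on version B (the rewrite author's own statement) =====
-- stated objective: faster
-- what changed: Single backward scan with early exit replaces A's full forward enumerate pass plus a second index loop: B stops at the first letter from the end, counting close-parens on the way.
-- outside the precondition, e.g. on d3_side('()*'): A returns (None, 2), B returns (None, 2)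
import Mathlib
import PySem

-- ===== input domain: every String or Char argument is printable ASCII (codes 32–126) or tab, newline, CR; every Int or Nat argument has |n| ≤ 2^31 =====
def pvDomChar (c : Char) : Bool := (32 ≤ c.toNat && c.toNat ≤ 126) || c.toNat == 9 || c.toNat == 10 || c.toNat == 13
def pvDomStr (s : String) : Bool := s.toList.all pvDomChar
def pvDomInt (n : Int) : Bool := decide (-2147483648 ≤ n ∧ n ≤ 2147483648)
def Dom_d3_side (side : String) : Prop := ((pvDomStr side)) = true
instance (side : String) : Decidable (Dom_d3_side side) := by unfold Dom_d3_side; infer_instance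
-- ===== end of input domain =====

-- B merges A's two passes into one backward scan with early exit at the last letter (objective: faster by a constant factor).

-- ===== PORT A =====
-- forward pass recording the last letter and its index ("" / -1 when absent)
def d3A_scan (cs : List Char) : String × Int :=
  (PySem.List.enumerate cs).foldl
    (fun st p => if PySem.Chars.isalpha p.2 then (String.mk [p.2], p.1) else st) ("", -1)

-- second pass: count ')' at indices lastIdx+1 … len-1
def d3A_count (cs : List Char) (lastIdx : Int) : Int :=
  (PySem.List.pyRange (lastIdx + 1) (cs.length : Int) 1).foldl
    (fun acc i => if PySem.List.pyGetD cs i ' ' = ')' then acc + 1 else acc) 0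

def d3_side (side : String) : String × Int :=
  let cs := PySem.Chars.strip side.toList
  let has_star := PySem.Chars.isIn ['*'] cs
  let r := d3A_scan cs
  if !has_star then (r.1, 0)
  else (r.1, d3A_count cs r.2 + 1)

-- ===== PORT B =====
-- one backward scan: count ')' until the first letter from the end, then stop
def d3B_go : List Char → Int → String × Int
  | [], close => ("", close)
  | c :: rest, close =>
    if PySem.Chars.isalpha c then (String.mk [c], close)
    else d3B_go rest (if c = ')' then close + 1 else close)

def d3_side_alt (side : String) : String × Int :=
  let cs := PySem.Chars.strip side.toList
  let has_star := PySem.Chars.isIn ['*'] cs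
  let r := d3B_go cs.reverse 0
  if has_star then (r.1, r.2 + 1) else (r.1, 0)

-- ===== PRECONDITION & SPEC =====
-- Pre_ excludes inputs whose stripped form contains no alphabetic character: there Python A
-- (and B) return None as the first component, which is not a value of the declared type str.
def Pre_d3_side (side : String) : Prop :=
  (PySem.Chars.strip side.toList).any PySem.Chars.isalpha = true
instance (side : String) : Decidable (Pre_d3_side side) := by unfold Pre_d3_side; infer_instance
def pvWitness_d3_side : String := "a*(b)"

def Spec_d3_side (side : String) (out : String × Int) : Prop := out = d3_side_alt side
instance (side : String) (out : String × Int) : Decidable (Spec_d3_side side out) := by unfold Spec_d3_side; infer_instance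

-- ===== CLAIM (what is proved, stated in full; the proofs are below) =====
def Claim_equal_d3_side : Prop := ∀ (side : String), Dom_d3_side side → Pre_d3_side side → Spec_d3_side side (d3_side side)

-- ===== LEMMAS AND PROOFS =====

lemma enumerate_append_singleton (t : List Char) (c : Char) (s : Int) :
    PySem.List.enumerate (t ++ [c]) s = PySem.List.enumerate t s ++ [((s + t.length : Int), c)] := by
  induction t generalizing s with
  | nil => simp [PySem.List.enumerate_cons, PySem.List.enumerate_nil]
  | cons x xs ih =>
      simp [PySem.List.enumerate_cons, ih]
      ring_nf

lemma d3A_scan_append (t : List Char) (c : Char) :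
    d3A_scan (t ++ [c]) =
      if PySem.Chars.isalpha c then (String.mk [c], (t.length : Int)) else d3A_scan t := by
  unfold d3A_scan
  rw [enumerate_append_singleton, List.foldl_append]
  simp

lemma d3A_scan_bounds (cs : List Char) :
    -1 ≤ (d3A_scan cs).2 ∧ (d3A_scan cs).2 < cs.length := by
  induction cs using List.reverseRecOn with
  | nil => simp [d3A_scan, PySem.List.enumerate_nil]
  | append_singleton t c ih =>
      rw [d3A_scan_append]
      rcases ih with ⟨h1, h2⟩
      by_cases h : PySem.Chars.isalpha c <;> simp [h] <;> omega

lemma d3B_go_acc (l : List Char) (a : Int) :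
    d3B_go l a = ((d3B_go l 0).1, (d3B_go l 0).2 + a) := by
  induction l generalizing a with
  | nil => simp [d3B_go]
  | cons c rest ih =>
      by_cases h : PySem.Chars.isalpha c
      · simp [d3B_go, h]
      · simp only [d3B_go, h, if_false]
        rw [ih, ih (if c = ')' then 0 + 1 else 0)]
        by_cases hc : c = ')' <;> simp [hc] <;> ring

lemma d3A_count_append (t : List Char) (c : Char) (i : Int)
    (h1 : -1 ≤ i) (h2 : i < t.length) :
    d3A_count (t ++ [c]) i = d3A_count t i + (if c = ')' then 1 else 0) := by
  unfold d3A_count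
  have hlen : ((t ++ [c]).length : Int) = (t.length : Int) + 1 := by simp
  rw [hlen, PySem.List.pyRange_one_succ_right (by omega), List.foldl_append]
  have hlast : PySem.List.pyGetD (t ++ [c]) (t.length : Int) ' ' = c := by
    rw [PySem.List.pyGetD_natCast]
    simp
  have hcong :
      (PySem.List.pyRange (i + 1) (t.length : Int) 1).foldl
        (fun acc j => if PySem.List.pyGetD (t ++ [c]) j ' ' = ')' then acc + 1 else acc) (0 : Int) =
      (PySem.List.pyRange (i + 1) (t.length : Int) 1).foldl
        (fun acc j => if PySem.List.pyGetD t j ' ' = ')' then acc + 1 else acc) (0 : Int) := by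
    apply PySem.List.foldl_congr_mem
    intro acc x hx
    have hm := (PySem.List.mem_pyRange_one).1 hx
    have hget : PySem.List.pyGetD (t ++ [c]) x ' ' = PySem.List.pyGetD t x ' ' := by
      rw [PySem.List.pyGetD_eq_getElem (t ++ [c]) ' ' (by omega) (by simp; omega),
          PySem.List.pyGetD_eq_getElem t ' ' (by omega) (by exact_mod_cast hm.2)]
      rw [List.getElem_append_left]
    rw [hget]
  rw [List.foldl_cons, List.foldl_nil, hcong, hlast]
  by_cases hc : c = ')' <;> simp [hc]

lemma d3_main (cs : List Char) :
    d3B_go cs.reverse 0 = ((d3A_scan cs).1, d3A_count cs (d3A_scan cs).2) := by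
  induction cs using List.reverseRecOn with
  | nil =>
      simp [d3B_go, d3A_scan, d3A_count, PySem.List.enumerate_nil,
        PySem.List.pyRange_one_eq_nil (by norm_num : (0:Int) ≤ 0)]
  | append_singleton t c ih =>
      rw [List.reverse_append]
      simp only [List.reverse_singleton, List.singleton_append]
      by_cases h : PySem.Chars.isalpha c
      · rw [d3A_scan_append]
        simp only [h, if_true, d3B_go]
        have : d3A_count (t ++ [c]) (t.length : Int) = 0 := by
          unfold d3A_count
          rw [PySem.List.pyRange_one_eq_nil (by simp)]
          rfl
        simp [this]
      · simp only [d3B_go, h, if_false]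
        rw [d3B_go_acc, ih, d3A_scan_append]
        simp only [if_neg (show ¬ (PySem.Chars.isalpha c = true) from by simpa using h)]
        rcases d3A_scan_bounds t with ⟨h1, h2⟩
        rw [d3A_count_append t c _ h1 h2]
        by_cases hc : c = ')' <;> simp [hc]

-- ===== VERDICT (by name: the statement is the Claim_ definition above) =====
theorem d3_side_spec : Claim_equal_d3_side := by
  intro side _ _
  unfold Spec_d3_side d3_side d3_side_alt
  simp only []
  rw [d3_main]
  by_cases h : PySem.Chars.isIn ['*'] (PySem.Chars.strip side.toList) <;> simp [h]
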